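-- pv_equiv track=rewrite | github.com/Xupeiyi/leetcode | OA/k_smallest_string.py | k_smallest_substring
-- ===== SOURCE A (Python) =====
-- def next_one(input_str, start, k):
--     """find the k-th 1 after start"""
--     if k == 0:
--         return start
--
--     n = len(input_str)
--     end = start + 1
--     n_ones = 0
--     while end < n and n_ones < k:
--         if input_str[end] == '1':
--             n_ones += 1
--
--             if n_ones == k:
--                 return end
--
--         end += 1
--
--     return -1
--
-- def str_cmp(str1, str2):
--     if len(str1) < len(str2):
--         return str1
--     elif len(str1) > len(str2):
--         return str2
--     else:
--         return min(str1, str2)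
--
-- def k_smallest_substring(input_str, k):
--     if k == 1:
--         return "1"
--
--     i = next_one(input_str, -1, 1)
--
--     j = next_one(input_str, i, k-1)
--     ans = input_str[i:j+1]
--
--     while i < len(input_str):
--         i = next_one(input_str, i, 1)
--         j = next_one(input_str, j, 1)
--
--         # if there is no more 1 after j
--         if j == -1:
--             break
--
--         ans = str_cmp(ans, input_str[i:j+1])
--
--     return ans
-- ===== SOURCE B (Python) =====
-- def k_smallest_substring(input_str, k):
--     if k == 1:
--         return "1"
--     ones = [i for i, c in enumerate(input_str) if c == '1']
--     if k < 1 or len(ones) < k: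
--         return ""
--     pairs = list(zip(ones, ones[k - 1:]))
--     best = min(b - a for a, b in pairs)
--     cands = [input_str[a:b + 1] for a, b in pairs if b - a == best]
--     return min(cands)
-- ===== Notes on version B (the rewrite author's own statement) =====
-- stated objective: faster
-- what changed: Replaces A's sliding-window loop (which repeatedly rescans the string with next_one and slices+compares a running best against every window) by a staged pipeline: collect all '1' positions once, pair each with the position k-1 ones later, take the minimal gap, and only slice and lexicographically compare the minimal-gap windows.
import Mathlib
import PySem

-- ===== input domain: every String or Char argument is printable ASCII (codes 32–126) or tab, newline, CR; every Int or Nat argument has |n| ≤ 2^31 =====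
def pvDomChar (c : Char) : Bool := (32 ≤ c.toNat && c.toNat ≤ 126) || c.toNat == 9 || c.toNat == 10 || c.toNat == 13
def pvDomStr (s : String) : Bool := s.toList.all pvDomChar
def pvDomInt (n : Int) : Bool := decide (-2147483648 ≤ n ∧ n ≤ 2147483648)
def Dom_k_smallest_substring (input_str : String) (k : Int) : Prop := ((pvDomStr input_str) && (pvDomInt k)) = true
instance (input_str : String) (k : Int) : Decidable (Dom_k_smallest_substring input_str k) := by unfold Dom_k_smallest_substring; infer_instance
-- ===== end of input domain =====

-- B re-implements the k-ones smallest window by precomputing all '1' positions once and taking a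
-- two-stage minimum (min gap, then lexicographic min among minimal-gap windows), instead of A's
-- rescanning sliding loop that slices and compares every window; objective: faster (constant factor).

-- ===== PORT A =====
-- while-loop of next_one: end/n_ones, scanning right while end < n and n_ones < k
def pvNextOneGo (s : List Char) (k : Int) (e : Int) (cnt : Int) : Int :=
  if h : e < (s.length : Int) ∧ cnt < k then
    if PySem.List.pyGet? s e = some '1' then
      if cnt + 1 = k then e
      else pvNextOneGo s k (e + 1) (cnt + 1)
    else pvNextOneGo s k (e + 1) cnt
  else -1
termination_by ((s.length : Int) - e).toNat
decreasing_by all_goals omega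

def pvNextOne (s : List Char) (start : Int) (k : Int) : Int :=
  if k = 0 then start else pvNextOneGo s k (start + 1) 0

def pvStrCmp (s1 s2 : List Char) : List Char :=
  if s1.length < s2.length then s1
  else if s2.length < s1.length then s2
  else min s1 s2

-- the main while-loop of k_smallest_substring; fuel only makes it total (s.length + 2 always suffices)
def pvKLoop (s : List Char) (fuel : Nat) (i j : Int) (ans : List Char) : List Char :=
  match fuel with
  | 0 => ans
  | fuel + 1 =>
    if i < (s.length : Int) then
      let i' := pvNextOne s i 1
      let j' := pvNextOne s j 1
      if j' = -1 then ans
      else pvKLoop s fuel i' j' (pvStrCmp ans (PySem.List.slice s (some i') (some (j' + 1))))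
    else ans

def k_smallest_substring (input_str : String) (k : Int) : String :=
  if k = 1 then "1"
  else
    let s := input_str.toList
    let i := pvNextOne s (-1) 1
    let j := pvNextOne s i (k - 1)
    let ans := PySem.List.slice s (some i) (some (j + 1))
    String.ofList (pvKLoop s (s.length + 2) i j ans)

-- ===== PORT B =====
def k_smallest_substring_alt (input_str : String) (k : Int) : String :=
  if k = 1 then "1"
  else
    let s := input_str.toList
    let ones := ((PySem.List.enumerate s).filter (fun p => p.2 == '1')).map (fun p => p.1)
    if k < 1 ∨ (ones.length : Int) < k then ""
    else
      let pairs := ones.zip (PySem.List.slice ones (some (k - 1)) none)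
      let best := (PySem.List.min? (pairs.map (fun p => p.2 - p.1)) (fun x => x)).getD 0
      let cands := (pairs.filter (fun p => p.2 - p.1 == best)).map
        (fun p => PySem.List.slice s (some p.1) (some (p.2 + 1)))
      String.ofList ((PySem.List.min? cands (fun x => x)).getD [])

-- ===== PRECONDITION & SPEC =====
def Spec_k_smallest_substring (input_str : String) (k : Int) (out : String) : Prop :=
  out = k_smallest_substring_alt input_str k
instance (input_str : String) (k : Int) (out : String) : Decidable (Spec_k_smallest_substring input_str k out) := by
  unfold Spec_k_smallest_substring; infer_instance

-- ===== CLAIM (what is proved, stated in full; the proofs are below) =====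
def Claim_equal_k_smallest_substring : Prop :=
  ∀ (input_str : String) (k : Int), Dom_k_smallest_substring input_str k →
    Spec_k_smallest_substring input_str k (k_smallest_substring input_str k)

-- ===== LEMMAS AND PROOFS =====

-- the list of indices of '1' in cs, positions offset by e
def pvOnes : List Char → Int → List Int
  | [], _ => []
  | c :: cs, e => if c = '1' then e :: pvOnes cs (e + 1) else pvOnes cs (e + 1)

theorem pvOnes_ge {cs : List Char} {e v : Int} (h : v ∈ pvOnes cs e) : e ≤ v := by
  induction cs generalizing e with
  | nil => simp [pvOnes] at h
  | cons c cs ih =>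
    by_cases hc : c = '1' <;> simp [pvOnes, hc] at h
    · rcases h with h | h
      · omega
      · have := ih h; omega
    · have := ih h; omega

theorem pvOnes_lt {cs : List Char} {e v : Int} (h : v ∈ pvOnes cs e) : v < e + cs.length := by
  induction cs generalizing e with
  | nil => simp [pvOnes] at h
  | cons c cs ih =>
    by_cases hc : c = '1' <;> simp [pvOnes, hc] at h
    · rcases h with h | h
      · simp; omega
      · have := ih h; simp; omega
    · have := ih h; simp; omega

theorem pvOnes_length_le (cs : List Char) (e : Int) : (pvOnes cs e).length ≤ cs.length := by
  induction cs generalizing e with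
  | nil => simp [pvOnes]
  | cons c cs ih =>
    by_cases hc : c = '1' <;> simp [pvOnes, hc]
    · exact ih _
    · have := ih (e + 1); omega

theorem pvOnes_pairwise (cs : List Char) (e : Int) : (pvOnes cs e).Pairwise (· < ·) := by
  induction cs generalizing e with
  | nil => simp [pvOnes]
  | cons c cs ih =>
    by_cases hc : c = '1' <;> simp [pvOnes, hc]
    · exact ⟨fun v hv => by have := pvOnes_ge hv; omega, ih _⟩
    · exact ih _

-- B's ones comprehension computes pvOnes
theorem pvOnes_eq_enum (cs : List Char) (e : Int) :
    ((PySem.List.enumerate cs e).filter (fun p => p.2 == '1')).map (fun p => p.1) = pvOnes cs e := by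
  induction cs generalizing e with
  | nil => simp [PySem.List.enumerate_nil, pvOnes]
  | cons c cs ih =>
    rw [PySem.List.enumerate_cons]
    by_cases hc : c = '1' <;> simp [pvOnes, hc, ih]

-- next_one's scan finds the (k-cnt-1)-th element of pvOnes of the remaining suffix
theorem pvNextOneGo_eq (s : List Char) (k : Int) :
    ∀ (d : Nat) (e cnt : Int), 0 ≤ e → cnt < k → s.length ≤ e.toNat + d →
      pvNextOneGo s k e cnt = ((pvOnes (s.drop e.toNat) e)[(k - cnt - 1).toNat]?).getD (-1) := by
  intro d
  induction d with
  | zero =>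
    intro e cnt he hcnt hlen
    rw [pvNextOneGo, dif_neg (by omega), List.drop_eq_nil_of_le (by omega)]
    simp [pvOnes]
  | succ d ih =>
    intro e cnt he hcnt hlen
    by_cases hlt : e < (s.length : Int)
    · have hidx : e.toNat < s.length := by omega
      rw [pvNextOneGo, dif_pos ⟨hlt, hcnt⟩, PySem.List.pyGet?_eq_some_getElem s he hlt,
        List.drop_eq_getElem_cons hidx]
      by_cases h1 : s[e.toNat] = '1'
      · rw [if_pos (by rw [h1])]
        rw [show pvOnes (s[e.toNat] :: List.drop (e.toNat + 1) s) e
              = e :: pvOnes (List.drop (e.toNat + 1) s) (e + 1) by simp [pvOnes, h1]]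
        by_cases h2 : cnt + 1 = k
        · rw [if_pos h2, show (k - cnt - 1).toNat = 0 by omega]
          simp
        · rw [if_neg h2, ih (e + 1) (cnt + 1) (by omega) (by omega) (by omega),
            show (e + 1).toNat = e.toNat + 1 by omega,
            show (k - cnt - 1).toNat = (k - (cnt + 1) - 1).toNat + 1 by omega]
          simp
      · rw [if_neg (by simp [h1]), ih (e + 1) cnt (by omega) hcnt (by omega),
          show (e + 1).toNat = e.toNat + 1 by omega]
        simp [pvOnes, h1]
    · rw [pvNextOneGo, dif_neg (by omega), List.drop_eq_nil_of_le (by omega)]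
      simp [pvOnes]

-- suffix correspondence: ones after position (ones[t]) are exactly drop (t+1) of ones
theorem pvOnes_suffix :
    ∀ (cs : List Char) (e : Int) (t : Nat) (v : Int), (pvOnes cs e)[t]? = some v →
      pvOnes (cs.drop (v + 1 - e).toNat) (v + 1) = (pvOnes cs e).drop (t + 1) := by
  intro cs
  induction cs with
  | nil => intro e t v h; simp [pvOnes] at h
  | cons c cs ih =>
    intro e t v h
    by_cases hc : c = '1'
    · rw [show pvOnes (c :: cs) e = e :: pvOnes cs (e + 1) by simp [pvOnes, hc]] at h ⊢
      cases t with
      | zero =>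
        rw [List.getElem?_cons_zero, Option.some_inj] at h
        rw [← h, show (e + 1 - e).toNat = 1 by omega]
        simp
      | succ t =>
        rw [List.getElem?_cons_succ] at h
        have hge : e + 1 ≤ v := pvOnes_ge (List.mem_of_getElem? h)
        rw [show (v + 1 - e).toNat = (v + 1 - (e + 1)).toNat + 1 by omega, List.drop_succ_cons,
          ih (e + 1) t v h]
        simp
    · rw [show pvOnes (c :: cs) e = pvOnes cs (e + 1) by simp [pvOnes, hc]] at h ⊢
      have hge : e + 1 ≤ v := pvOnes_ge (List.mem_of_getElem? h)
      rw [show (v + 1 - e).toNat = (v + 1 - (e + 1)).toNat + 1 by omega, List.drop_succ_cons,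
        ih (e + 1) t v h]

theorem pvNextOne_start (s : List Char) (k : Int) (hk : 1 ≤ k) :
    pvNextOne s (-1) k = ((pvOnes s 0)[(k - 1).toNat]?).getD (-1) := by
  rw [pvNextOne, if_neg (by omega), show (-1 : Int) + 1 = 0 by ring,
    pvNextOneGo_eq s k s.length 0 0 le_rfl (by omega) (by simp), show (0 : Int).toNat = 0 by rfl,
    List.drop_zero, show k - 0 - 1 = k - 1 by ring]

theorem pvNextOne_from (s : List Char) {t : Nat} {v : Int} (hv : (pvOnes s 0)[t]? = some v)
    (k : Int) (hk : 1 ≤ k) :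
    pvNextOne s v k = (((pvOnes s 0).drop (t + 1))[(k - 1).toNat]?).getD (-1) := by
  have hv0 : 0 ≤ v := pvOnes_ge (List.mem_of_getElem? hv)
  rw [pvNextOne, if_neg (by omega),
    pvNextOneGo_eq s k s.length (v + 1) 0 (by omega) (by omega) (by omega),
    show k - 0 - 1 = k - 1 by ring]
  have := pvOnes_suffix s 0 t v hv
  rw [show (v + 1 - 0).toNat = (v + 1).toNat by ring_nf] at this
  rw [this]

-- ans = [] is absorbing for the loop
theorem pvStrCmp_nil (x : List Char) : pvStrCmp [] x = [] := by
  cases x <;> simp [pvStrCmp]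

theorem pvKLoop_nil (s : List Char) : ∀ (fuel : Nat) (i j : Int), pvKLoop s fuel i j [] = [] := by
  intro fuel
  induction fuel with
  | zero => intro i j; rfl
  | succ f ih =>
    intro i j
    simp only [pvKLoop]
    split
    · split
      · rfl
      · rw [pvStrCmp_nil]; exact ih _ _
    · rfl

-- the "shorter, then lexicographically smaller" order A folds with
def pvLe (a b : List Char) : Prop :=
  a.length < b.length ∨ (a.length = b.length ∧ a ≤ b)

theorem pvLe_refl (a : List Char) : pvLe a a := Or.inr ⟨rfl, le_refl a⟩

theorem pvLe_trans {a b c : List Char} (h1 : pvLe a b) (h2 : pvLe b c) : pvLe a c := by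
  rcases h1 with h1 | ⟨h1, h1'⟩ <;> rcases h2 with h2 | ⟨h2, h2'⟩
  · exact Or.inl (by omega)
  · exact Or.inl (by omega)
  · exact Or.inl (by omega)
  · exact Or.inr ⟨by omega, le_trans h1' h2'⟩

theorem pvLe_antisymm {a b : List Char} (h1 : pvLe a b) (h2 : pvLe b a) : a = b := by
  rcases h1 with h1 | ⟨h1, h1'⟩ <;> rcases h2 with h2 | ⟨h2, h2'⟩ <;> first
    | omega
    | exact le_antisymm h1' h2'

theorem pvStrCmp_cases (a b : List Char) : pvStrCmp a b = a ∨ pvStrCmp a b = b := by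
  unfold pvStrCmp
  split
  · exact Or.inl rfl
  · split
    · exact Or.inr rfl
    · rcases min_choice a b with h | h <;> [exact Or.inl h; exact Or.inr h]

theorem pvStrCmp_le_left (a b : List Char) : pvLe (pvStrCmp a b) a := by
  unfold pvStrCmp
  split
  · exact pvLe_refl a
  · split
    · exact Or.inl (by assumption)
    · have hl : b.length = a.length := by omega
      exact Or.inr ⟨by rcases min_choice a b with h | h <;> simp [h, hl], min_le_left a b⟩

theorem pvStrCmp_le_right (a b : List Char) : pvLe (pvStrCmp a b) b := by
  unfold pvStrCmp
  split
  · exact Or.inl (by assumption)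
  · split
    · exact pvLe_refl b
    · have hl : b.length = a.length := by omega
      exact Or.inr ⟨by rcases min_choice a b with h | h <;> simp [h, hl], min_le_right a b⟩

-- A's fold computes a pvLe-least member
theorem pvFold_mem (w : List Char) (ws : List (List Char)) :
    List.foldl pvStrCmp w ws ∈ w :: ws := by
  induction ws generalizing w with
  | nil => simp
  | cons v vs ih =>
    rw [List.foldl_cons]
    rcases pvStrCmp_cases w v with hc | hc <;> rw [hc] <;>
      [have h := ih w; have h := ih v] <;> simp only [List.mem_cons] at h ⊢ <;> tauto

theorem pvFold_least (w : List Char) (ws : List (List Char)) :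
    ∀ v ∈ w :: ws, pvLe (List.foldl pvStrCmp w ws) v := by
  induction ws generalizing w with
  | nil =>
    intro v hv
    rw [List.mem_singleton] at hv
    subst hv
    exact pvLe_refl v
  | cons x xs ih =>
    intro v hv
    rw [List.foldl_cons]
    have hhead := ih (pvStrCmp w x) (pvStrCmp w x) (List.mem_cons_self)
    rcases List.mem_cons.mp hv with rfl | hv'
    · exact pvLe_trans hhead (pvStrCmp_le_left v x)
    · rcases List.mem_cons.mp hv' with rfl | hv''
      · exact pvLe_trans hhead (pvStrCmp_le_right w v)
      · exact ih (pvStrCmp w x) v (List.mem_cons_of_mem _ hv'')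

theorem pvNextOneGo_none (s : List Char) (k e cnt : Int) (h : ¬ cnt < k) :
    pvNextOneGo s k e cnt = -1 := by
  rw [pvNextOneGo, dif_neg (by tauto)]

theorem pvSlice_zero (s : List Char) (i : Int) : PySem.List.slice s (some i) (some 0) = [] := by
  simp [PySem.List.slice, PySem.List.clampIdx]

theorem pvClamp (n : Nat) (x : Int) (h1 : 0 ≤ x) (h2 : x ≤ (n : Int)) :
    PySem.List.clampIdx n x = x.toNat := by
  rw [show x = ((x.toNat : Nat) : Int) by omega, PySem.List.clampIdx_natCast]
  omega

theorem pvLenSlice (s : List Char) (a b : Int) (h0 : 0 ≤ a) (hab : a ≤ b)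
    (hb : b < (s.length : Int)) :
    ((PySem.List.slice s (some a) (some (b + 1))).length : Int) = b + 1 - a := by
  rw [PySem.List.length_slice, pvClamp s.length (b + 1) (by omega) (by omega),
    pvClamp s.length a (by omega) (by omega)]
  omega

theorem pvZip_cons (L : List Int) (t d : Nat) (h : t + d < L.length) :
    (L.drop t).zip (L.drop (t + d)) = (L[t], L[t + d]) :: (L.drop (t + 1)).zip (L.drop (t + d + 1)) := by
  rw [List.drop_eq_getElem_cons (show t < L.length by omega),
    List.drop_eq_getElem_cons (show t + d < L.length from h)]
  rfl

theorem pvPair_facts (s : List Char) (d : Nat) (hd : 1 ≤ d) {p : Int × Int}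
    (hp : p ∈ (pvOnes s 0).zip ((pvOnes s 0).drop d)) :
    0 ≤ p.1 ∧ p.1 ≤ p.2 ∧ p.2 < (s.length : Int) := by
  obtain ⟨u, hu, hq⟩ := List.mem_iff_getElem.mp hp
  rw [List.length_zip, List.length_drop] at hu
  have hu1 : u < (pvOnes s 0).length := by omega
  have hu2 : d + u < (pvOnes s 0).length := by omega
  rw [List.getElem_zip] at hq
  rw [List.getElem_drop] at hq
  have h1 : (0 : Int) ≤ (pvOnes s 0)[u] := pvOnes_ge (List.getElem_mem hu1)
  have h2 : (pvOnes s 0)[u] < (pvOnes s 0)[d + u] :=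
    List.pairwise_iff_getElem.mp (pvOnes_pairwise s 0) u (d + u) hu1 hu2 (by omega)
  have h3 : (pvOnes s 0)[d + u] < 0 + (s.length : Int) := pvOnes_lt (List.getElem_mem hu2)
  rw [← hq]
  exact ⟨h1, by omega, by omega⟩

-- the A loop, started at state t, folds pvStrCmp over the remaining windows
theorem pvKLoop_eq (s : List Char) (kn : Nat) (hkn : 1 ≤ kn) :
    ∀ (fuel : Nat) (t : Nat) (ans : List Char),
      t + kn < (pvOnes s 0).length → (pvOnes s 0).length - (t + kn) ≤ fuel →
      pvKLoop s fuel (((pvOnes s 0)[t]?).getD (-1)) (((pvOnes s 0)[t + kn]?).getD (-1)) ans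
        = List.foldl pvStrCmp ans
            ((((pvOnes s 0).drop (t + 1)).zip ((pvOnes s 0).drop (t + 1 + kn))).map
              (fun p => PySem.List.slice s (some p.1) (some (p.2 + 1)))) := by
  intro fuel
  induction fuel with
  | zero => intro t ans ht hf; omega
  | succ f ih =>
    intro t ans ht hf
    have htL : t < (pvOnes s 0).length := by omega
    have hiv : (pvOnes s 0)[t]? = some (pvOnes s 0)[t] := List.getElem?_eq_getElem htL
    have hjv : (pvOnes s 0)[t + kn]? = some (pvOnes s 0)[t + kn] := List.getElem?_eq_getElem ht
    rw [hiv, hjv]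
    simp only [Option.getD_some]
    rw [pvKLoop]
    have hcond : (pvOnes s 0)[t] < (s.length : Int) := by
      have := pvOnes_lt (List.getElem_mem htL)
      omega
    rw [if_pos hcond]
    have hi' : pvNextOne s (pvOnes s 0)[t] 1
        = (((pvOnes s 0).drop (t + 1))[0]?).getD (-1) := by
      rw [pvNextOne_from s hiv 1 le_rfl]
      norm_num
    have hj' : pvNextOne s (pvOnes s 0)[t + kn] 1
        = (((pvOnes s 0).drop (t + kn + 1))[0]?).getD (-1) := by
      rw [pvNextOne_from s hjv 1 le_rfl]
      norm_num
    by_cases hlast : t + kn + 1 = (pvOnes s 0).length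
    · -- j was the last one: break, no windows remain
      have hnil : (pvOnes s 0).drop (t + kn + 1) = [] := List.drop_eq_nil_of_le (by omega)
      rw [hi', hj', hnil]
      norm_num
      rw [show t + 1 + kn = t + kn + 1 by omega, hnil]
      simp
    · have hlt : t + kn + 1 < (pvOnes s 0).length := by omega
      have hj'' : pvNextOne s (pvOnes s 0)[t + kn] 1 = (pvOnes s 0)[t + kn + 1] := by
        rw [hj', List.getElem?_drop]
        simp only [Nat.add_zero]
        rw [List.getElem?_eq_getElem hlt]
        rfl
      have hi'' : pvNextOne s (pvOnes s 0)[t] 1 = (pvOnes s 0)[t + 1] := by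
        rw [hi', List.getElem?_drop]
        simp only [Nat.add_zero]
        rw [List.getElem?_eq_getElem (show t + 1 < (pvOnes s 0).length by omega)]
        rfl
      have hlt2 : t + 1 + kn < (pvOnes s 0).length := by omega
      have hj3 : pvNextOne s (pvOnes s 0)[t + kn] 1 = (pvOnes s 0)[t + 1 + kn] := by
        rw [hj'']
        congr 1
        omega
      have hjpos : (0 : Int) ≤ (pvOnes s 0)[t + 1 + kn] :=
        pvOnes_ge (List.getElem_mem hlt2)
      rw [hi'', hj3, if_neg (by omega)]
      have hrec := ih (t + 1) (pvStrCmp ans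
        (PySem.List.slice s (some (pvOnes s 0)[t + 1]) (some ((pvOnes s 0)[t + 1 + kn] + 1))))
        (by omega) (by omega)
      rw [List.getElem?_eq_getElem (show t + 1 < (pvOnes s 0).length by omega),
        List.getElem?_eq_getElem hlt2] at hrec
      simp only [Option.getD_some] at hrec
      rw [hrec]
      rw [pvZip_cons (pvOnes s 0) (t + 1) kn (by omega)]
      rw [show t + 1 + kn + 1 = t + 1 + 1 + kn by omega]
      simp

-- the candidate windows (one per start position of k consecutive ones)
def pvWin (s : List Char) : Int × Int → List Char :=
  fun p => PySem.List.slice s (some p.1) (some (p.2 + 1))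

def pvWindows (s : List Char) (kn : Nat) : List (List Char) :=
  ((pvOnes s 0).zip ((pvOnes s 0).drop kn)).map (pvWin s)

-- A's j becomes -1 immediately when k < 1 or there are fewer than k ones
theorem pvA_degenerate (s : List Char) (k : Int) (hk1 : k ≠ 1)
    (hdeg : k < 1 ∨ ((pvOnes s 0).length : Int) < k) :
    pvNextOne s (pvNextOne s (-1) 1) (k - 1) = -1 := by
  by_cases hklt : k < 1
  · rw [pvNextOne, if_neg (by omega)]
    exact pvNextOneGo_none s (k - 1) _ 0 (by omega)
  · have hk2 : 2 ≤ k := by omega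
    have hm : ((pvOnes s 0).length : Int) < k := by tauto
    rcases hL : pvOnes s 0 with _ | ⟨v, L'⟩
    · have hi : pvNextOne s (-1) 1 = -1 := by
        rw [pvNextOne_start s 1 le_rfl, hL]
        simp
      rw [hi, pvNextOne_start s (k - 1) (by omega), hL]
      simp
    · have h0 : 0 < (pvOnes s 0).length := by rw [hL]; simp
      have hL0 : (pvOnes s 0)[0]? = some (pvOnes s 0)[0] := List.getElem?_eq_getElem h0
      have hi : pvNextOne s (-1) 1 = (pvOnes s 0)[0] := by
        rw [pvNextOne_start s 1 le_rfl]
        norm_num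
        rw [hL0]
        rfl
      rw [hi, pvNextOne_from s hL0 (k - 1) (by omega), List.getElem?_drop,
        List.getElem?_eq_none (by omega)]
      rfl

-- main case: A's loop folds pvStrCmp over the window list
theorem pvA_fold (s : List Char) (k : Int) (hk : 2 ≤ k)
    (hm : k ≤ ((pvOnes s 0).length : Int)) :
    ∃ w ws, pvWindows s (k - 1).toNat = w :: ws ∧
      pvKLoop s (s.length + 2) (pvNextOne s (-1) 1)
        (pvNextOne s (pvNextOne s (-1) 1) (k - 1))
        (PySem.List.slice s (some (pvNextOne s (-1) 1))
          (some (pvNextOne s (pvNextOne s (-1) 1) (k - 1) + 1)))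
      = List.foldl pvStrCmp w ws := by
  have h0 : 0 < (pvOnes s 0).length := by omega
  have hkn1 : 1 ≤ (k - 1).toNat := by omega
  have hknm : (k - 1).toNat < (pvOnes s 0).length := by omega
  have hL0 : (pvOnes s 0)[0]? = some (pvOnes s 0)[0] := List.getElem?_eq_getElem h0
  have hi : pvNextOne s (-1) 1 = (pvOnes s 0)[0] := by
    rw [pvNextOne_start s 1 le_rfl]
    norm_num
    rw [hL0]
    rfl
  have hj : pvNextOne s (pvOnes s 0)[0] (k - 1) = (pvOnes s 0)[(k - 1).toNat] := by
    rw [pvNextOne_from s hL0 (k - 1) (by omega), List.getElem?_drop,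
      show 0 + 1 + (k - 1 - 1).toNat = (k - 1).toNat by omega, List.getElem?_eq_getElem hknm]
    rfl
  have hKL := pvKLoop_eq s (k - 1).toNat hkn1 (s.length + 2) 0
    (PySem.List.slice s (some (pvOnes s 0)[0]) (some ((pvOnes s 0)[(k - 1).toNat] + 1)))
    (by omega) (by have := pvOnes_length_le s 0; omega)
  simp only [Nat.zero_add] at hKL
  rw [hL0, List.getElem?_eq_getElem hknm] at hKL
  simp only [Option.getD_some] at hKL
  have hzip := pvZip_cons (pvOnes s 0) 0 (k - 1).toNat (by omega)
  simp only [Nat.zero_add, List.drop_zero] at hzip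
  rw [show (k - 1).toNat + 1 = 1 + (k - 1).toNat by omega] at hzip
  refine ⟨pvWin s ((pvOnes s 0)[0], (pvOnes s 0)[(k - 1).toNat]),
    (((pvOnes s 0).drop 1).zip ((pvOnes s 0).drop (1 + (k - 1).toNat))).map (pvWin s), ?_, ?_⟩
  · rw [pvWindows, hzip, List.map_cons]
  · rw [hi, hj, hKL]
    rfl

-- the two DecidableLT instances on List Char decide the same order
theorem pvMinBridge (xs : List (List Char)) :
    @PySem.List.min? (List Char) (List Char) List.instLT (fun a b => a.decidableLT b) xs (fun x => x)
      = @PySem.List.min? (List Char) (List Char) LinearOrder.toPartialOrder.toLT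
          LinearOrder.toDecidableLT xs (fun x => x) := by
  congr 1

-- main case: B's two-stage minimum is a pvLe-least window
theorem pvB_least (s : List Char) (k : Int) (hk : 2 ≤ k)
    (hm : k ≤ ((pvOnes s 0).length : Int)) :
    ∃ r, (PySem.List.min? ((((pvOnes s 0).zip (PySem.List.slice (pvOnes s 0) (some (k - 1)) none)).filter
        (fun p => p.2 - p.1 ==
          (PySem.List.min? (((pvOnes s 0).zip (PySem.List.slice (pvOnes s 0) (some (k - 1)) none)).map
            (fun p => p.2 - p.1)) (fun x => x)).getD 0)).map
        (fun p => PySem.List.slice s (some p.1) (some (p.2 + 1)))) (fun x => x)).getD [] = r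
      ∧ r ∈ pvWindows s (k - 1).toNat
      ∧ ∀ v ∈ pvWindows s (k - 1).toNat, pvLe r v := by
  have hkn1 : 1 ≤ (k - 1).toNat := by omega
  have hknm : (k - 1).toNat < (pvOnes s 0).length := by omega
  rw [PySem.List.slice_from (pvOnes s 0) (show (0 : Int) ≤ k - 1 by omega)]
  have hpne : (pvOnes s 0).zip ((pvOnes s 0).drop (k - 1).toNat) ≠ [] := by
    apply List.ne_nil_of_length_pos
    rw [List.length_zip, List.length_drop]
    omega
  obtain ⟨q, qs, hqs⟩ := List.exists_cons_of_ne_nil hpne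
  rw [hqs, List.map_cons, PySem.List.min?_id_cons, Option.getD_some]
  have hle : ∀ p ∈ q :: qs,
      List.foldl min (q.2 - q.1) (qs.map (fun p => p.2 - p.1)) ≤ p.2 - p.1 := by
    intro p hp
    rcases List.mem_cons.mp hp with rfl | hp'
    · exact (PySem.List.foldl_min_le _ _).1
    · exact (PySem.List.foldl_min_le _ _).2 _ (List.mem_map_of_mem hp')
  have hbm : ∃ p ∈ q :: qs,
      p.2 - p.1 = List.foldl min (q.2 - q.1) (qs.map (fun p => p.2 - p.1)) := by
    rcases PySem.List.foldl_min_mem (qs.map (fun p => p.2 - p.1)) (q.2 - q.1) with h | h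
    · exact ⟨q, List.mem_cons_self, h.symm⟩
    · obtain ⟨p, hp, hval⟩ := List.mem_map.mp h
      exact ⟨p, List.mem_cons_of_mem _ hp, hval⟩
  obtain ⟨phat, hphat, hghat⟩ := hbm
  have hfilmem : phat ∈ (q :: qs).filter (fun p => p.2 - p.1 ==
      List.foldl min (q.2 - q.1) (qs.map (fun p => p.2 - p.1))) :=
    List.mem_filter.mpr ⟨hphat, by simp [hghat]⟩
  have hcne : ((q :: qs).filter (fun p => p.2 - p.1 ==
      List.foldl min (q.2 - q.1) (qs.map (fun p => p.2 - p.1)))).map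
      (fun p => PySem.List.slice s (some p.1) (some (p.2 + 1))) ≠ [] := by
    intro hnil
    rw [List.map_eq_nil_iff] at hnil
    rw [hnil] at hfilmem
    exact List.not_mem_nil hfilmem
  rcases hmin : PySem.List.min? (((q :: qs).filter (fun p => p.2 - p.1 ==
      List.foldl min (q.2 - q.1) (qs.map (fun p => p.2 - p.1)))).map
      (fun p => PySem.List.slice s (some p.1) (some (p.2 + 1)))) (fun x => x) with _ | r
  · exact absurd ((PySem.List.min?_eq_none_iff _ _).mp hmin) hcne
  · have hminL := hmin
    rw [pvMinBridge] at hminL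
    have hrmem := PySem.List.min?_mem hmin
    obtain ⟨p, hpfil, hrp⟩ := List.mem_map.mp hrmem
    have hppairs : p ∈ (pvOnes s 0).zip ((pvOnes s 0).drop (k - 1).toNat) := by
      rw [hqs]; exact List.mem_of_mem_filter hpfil
    have hpbest : p.2 - p.1 = List.foldl min (q.2 - q.1) (qs.map (fun p => p.2 - p.1)) := by
      have := (List.mem_filter.mp hpfil).2
      simpa using this
    have hpf := pvPair_facts s (k - 1).toNat hkn1 hppairs
    have hlenr : ((PySem.List.slice s (some p.1) (some (p.2 + 1))).length : Int) = p.2 + 1 - p.1 :=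
      pvLenSlice s p.1 p.2 hpf.1 hpf.2.1 hpf.2.2
    refine ⟨r, by rw [hmin]; rfl, ?_, ?_⟩
    · rw [← hrp, pvWindows]
      exact List.mem_map_of_mem hppairs
    · rw [hrp] at hlenr
      intro v hv
      rw [pvWindows] at hv
      obtain ⟨p', hp'pairs, hvp'⟩ := List.mem_map.mp hv
      simp only [pvWin] at hvp'
      have hp'f := pvPair_facts s (k - 1).toNat hkn1 hp'pairs
      have hlenv : ((PySem.List.slice s (some p'.1) (some (p'.2 + 1))).length : Int)
          = p'.2 + 1 - p'.1 := pvLenSlice s p'.1 p'.2 hp'f.1 hp'f.2.1 hp'f.2.2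
      have hp'mem : p' ∈ q :: qs := by rw [← hqs]; exact hp'pairs
      by_cases hgp : p'.2 - p'.1 = List.foldl min (q.2 - q.1) (qs.map (fun p => p.2 - p.1))
      · have hvc : PySem.List.slice s (some p'.1) (some (p'.2 + 1)) ∈
            ((q :: qs).filter (fun p => p.2 - p.1 ==
              List.foldl min (q.2 - q.1) (qs.map (fun p => p.2 - p.1)))).map
              (fun p => PySem.List.slice s (some p.1) (some (p.2 + 1))) :=
          List.mem_map_of_mem (List.mem_filter.mpr ⟨hp'mem, by simp [hgp]⟩)
        have hrle := PySem.List.min?_isMin hminL _ hvc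
        refine Or.inr ⟨?_, ?_⟩
        · rw [← hvp']
          omega
        · rw [← hvp']
          exact hrle
      · have hlt : List.foldl min (q.2 - q.1) (qs.map (fun p => p.2 - p.1)) < p'.2 - p'.1 := by
          have := hle p' hp'mem
          omega
        refine Or.inl ?_
        rw [← hvp']
        omega

-- ===== VERDICT (by name: the statement is the Claim_ definition above) =====
theorem k_smallest_substring_spec : Claim_equal_k_smallest_substring := by
  unfold Claim_equal_k_smallest_substring
  intro input_str k _hdom
  unfold Spec_k_smallest_substring
  by_cases hk1 : k = 1
  · simp [k_smallest_substring, k_smallest_substring_alt, hk1]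
  · simp only [k_smallest_substring, k_smallest_substring_alt, if_neg hk1, pvOnes_eq_enum]
    split
    next hdeg =>
      rw [pvA_degenerate input_str.toList k hk1 hdeg]
      norm_num
      rw [pvSlice_zero, pvKLoop_nil]
    next hdeg =>
      rw [not_or, not_lt, not_lt] at hdeg
      have hk2 : 2 ≤ k := by omega
      have hm : k ≤ ((pvOnes input_str.toList 0).length : Int) := hdeg.2
      obtain ⟨w, ws, hw, hA⟩ := pvA_fold input_str.toList k hk2 hm
      obtain ⟨r, hrB, hrmem, hrleast⟩ := pvB_least input_str.toList k hk2 hm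
      have hAmem := pvFold_mem w ws
      have hAleast := pvFold_least w ws
      rw [← hw] at hAmem hAleast
      rw [hA, hrB]
      exact congrArg String.ofList (pvLe_antisymm (hAleast r hrmem) (hrleast _ hAmem))
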